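-- pv_equiv track=rewrite | github.com/syeniite/AoC21 | Day20/day_20.py | get_enhancement_encoding
-- ===== SOURCE A (Python) =====
-- def get_encoding_number(pixels):
--     encoding_number = 0
--
--     for pos, pixel in enumerate(reversed(pixels)):
--         if pixel == '#':
--             encoding_number |= 1 << pos
--
--     return encoding_number
--
-- def get_enhancement_encoding(image, i, j, boundary_pixel, enhancement_table):
--     def get_surrounding_indices():
--         return (i - 1, j - 1), (i - 1, j), (i - 1, j + 1), \
--                (i, j - 1), (i, j), (i, j + 1), \
--                (i + 1, j - 1), (i + 1, j), (i + 1, j + 1)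
--
--     def is_in_core_image(y, x):
--         return 0 <= y < len(image) and 0 <= x < len(image[0])
--
--     surrounding_pixels = [image[k][l] if is_in_core_image(k, l) else boundary_pixel
--                           for k, l in get_surrounding_indices()]
--
--     return enhancement_table[get_encoding_number(surrounding_pixels)]
-- ===== SOURCE B (Python) =====
-- def get_enhancement_encoding(image, i, j, boundary_pixel, enhancement_table):
--     h = len(image)
--     w = len(image[0]) if image else 0
--     b = 1 if boundary_pixel == '#' else 0
--     # Start from the index of an all-boundary window, then visit only the
--     # cells where the 3x3 window actually intersects the image (clipped
--     # ranges) and swap each such cell's boundary contribution for its real one.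
--     index = 511 * b
--     for k in range(max(i - 1, 0), min(i + 2, h)):
--         for l in range(max(j - 1, 0), min(j + 2, w)):
--             bit = 1 if image[k][l] == '#' else 0
--             index += (bit - b) * 2 ** (8 - 3 * (k - i + 1) - (l - j + 1))
--     return enhancement_table[index]
-- ===== Notes on version B (the rewrite author's own statement) =====
-- stated objective: alternative
-- what changed: Instead of gathering all nine neighbors (testing bounds per neighbor) and bit-shift-encoding the reversed list, B starts from the index of an all-boundary window (511 or 0) and iterates only over the clipped intersection of the 3x3 window with the image, arithmetically swapping each visited cell's boundary contribution for its real one.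
import Mathlib
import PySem

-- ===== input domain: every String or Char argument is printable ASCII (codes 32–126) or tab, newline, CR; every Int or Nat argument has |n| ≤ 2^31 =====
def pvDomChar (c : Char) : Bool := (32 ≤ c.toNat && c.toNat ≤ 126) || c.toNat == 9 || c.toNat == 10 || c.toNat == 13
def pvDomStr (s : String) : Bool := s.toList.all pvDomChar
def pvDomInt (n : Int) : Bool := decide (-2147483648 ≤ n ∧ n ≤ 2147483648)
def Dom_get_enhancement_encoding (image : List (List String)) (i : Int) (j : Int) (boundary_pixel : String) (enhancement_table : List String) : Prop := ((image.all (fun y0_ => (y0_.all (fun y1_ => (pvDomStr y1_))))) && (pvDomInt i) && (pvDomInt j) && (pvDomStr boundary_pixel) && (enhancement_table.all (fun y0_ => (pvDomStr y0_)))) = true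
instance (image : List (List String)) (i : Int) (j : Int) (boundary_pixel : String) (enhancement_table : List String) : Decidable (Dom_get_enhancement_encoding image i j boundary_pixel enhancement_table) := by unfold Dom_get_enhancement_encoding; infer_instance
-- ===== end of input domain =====

-- B starts from the all-boundary window index (511 or 0) and then walks ONLY the cells
-- where the 3x3 window intersects the image (clipped ranges), swapping each visited
-- cell's boundary contribution for its real one — instead of A's gather-9-neighbors
-- list plus reversed bit-shift encoder. Objective: alternative decomposition.

-- ===== PORT A =====

def get_encoding_number (pixels : List String) : Int :=
  (PySem.List.enumerate pixels.reverse).foldl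
    (fun acc pp => if pp.2 == "#" then PySem.Int.bor acc ((1 : Int) <<< pp.1.toNat) else acc) 0

def pvCore (image : List (List String)) (y : Int) (x : Int) : Bool :=
  decide (0 ≤ y) && decide (y < (image.length : Int)) &&
  decide (0 ≤ x) && decide (x < ((image.headD []).length : Int))

def get_enhancement_encoding (image : List (List String)) (i : Int) (j : Int) (boundary_pixel : String) (enhancement_table : List String) : String :=
  let idxs : List (Int × Int) :=
    [(i-1, j-1), (i-1, j), (i-1, j+1),
     (i, j-1), (i, j), (i, j+1),
     (i+1, j-1), (i+1, j), (i+1, j+1)]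
  let surrounding := idxs.map (fun kl =>
    if pvCore image kl.1 kl.2
    then ((PySem.List.pyGet? ((PySem.List.pyGet? image kl.1).getD []) kl.2).getD "")   -- raise excluded by Pre_
    else boundary_pixel)
  (PySem.List.pyGet? enhancement_table (get_encoding_number surrounding)).getD ""   -- raise excluded by Pre_

-- ===== PORT B =====

def get_enhancement_encoding_alt (image : List (List String)) (i : Int) (j : Int) (boundary_pixel : String) (enhancement_table : List String) : String :=
  let h : Int := image.length
  let w : Int := if image.isEmpty then 0 else ((image.headD []).length : Int)
  let b : Int := if boundary_pixel == "#" then 1 else 0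
  let idx : Int :=
    (PySem.List.pyRange (max (i-1) 0) (min (i+2) h) 1).foldl (fun acc k =>
      (PySem.List.pyRange (max (j-1) 0) (min (j+2) w) 1).foldl (fun acc2 l =>
        acc2 + ((if ((PySem.List.pyGet? ((PySem.List.pyGet? image k).getD []) l).getD "") == "#" then (1 : Int) else 0) - b)
               -- '2 ** e': e is in 0..8 for every visited cell, so .toNat is exact here
               * 2 ^ (8 - 3 * (k - i + 1) - (l - j + 1)).toNat) acc) (511 * b)
  (PySem.List.pyGet? enhancement_table idx).getD ""   -- raise excluded by Pre_

-- ===== PRECONDITION & SPEC =====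

-- helpers for Pre_ (pvCore above is shared with port A's bounds check)
def pvPix (image : List (List String)) (bp : String) (k : Int) (l : Int) : String :=
  if pvCore image k l
  then ((PySem.List.pyGet? ((PySem.List.pyGet? image k).getD []) l).getD "")
  else bp

def pvBit (image : List (List String)) (bp : String) (k : Int) (l : Int) : Int :=
  if pvPix image bp k l == "#" then 1 else 0

def pvRowOk (image : List (List String)) (k : Int) (l : Int) : Bool :=
  !(pvCore image k l) || (PySem.List.pyGet? ((PySem.List.pyGet? image k).getD []) l).isSome

-- Pre_ excludes exactly the inputs where Python A raises an IndexError: a neighbor cell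
-- passing the (rectangularity-assuming) bounds check but lying beyond its actual row's
-- length, or an encoding index not below len(enhancement_table).
def Pre_get_enhancement_encoding (image : List (List String)) (i : Int) (j : Int) (boundary_pixel : String) (enhancement_table : List String) : Prop :=
  pvRowOk image (i-1) (j-1) = true ∧ pvRowOk image (i-1) j = true ∧ pvRowOk image (i-1) (j+1) = true ∧
  pvRowOk image i (j-1) = true ∧ pvRowOk image i j = true ∧ pvRowOk image i (j+1) = true ∧
  pvRowOk image (i+1) (j-1) = true ∧ pvRowOk image (i+1) j = true ∧ pvRowOk image (i+1) (j+1) = true ∧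
  256 * pvBit image boundary_pixel (i-1) (j-1) + 128 * pvBit image boundary_pixel (i-1) j +
  64 * pvBit image boundary_pixel (i-1) (j+1) + 32 * pvBit image boundary_pixel i (j-1) +
  16 * pvBit image boundary_pixel i j + 8 * pvBit image boundary_pixel i (j+1) +
  4 * pvBit image boundary_pixel (i+1) (j-1) + 2 * pvBit image boundary_pixel (i+1) j +
  pvBit image boundary_pixel (i+1) (j+1) < (enhancement_table.length : Int)

instance (image : List (List String)) (i : Int) (j : Int) (boundary_pixel : String) (enhancement_table : List String) : Decidable (Pre_get_enhancement_encoding image i j boundary_pixel enhancement_table) := by unfold Pre_get_enhancement_encoding; infer_instance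

def pvWitness_get_enhancement_encoding : List (List String) × Int × Int × String × List String :=
  ([["#", "."], [".", "#"]], 0, 1, ".",
   ["a","b","c","d","e","f","g","h","i","j","k","l","m","n","o","p","q","r","s","t","u","v","w","x","y","z",
    "A","B","C","D","E","F","G","H","I","J","K","L","M","N","O","P","Q","R","S","T","U","V","W","X","Y","Z"])

def Spec_get_enhancement_encoding (image : List (List String)) (i : Int) (j : Int) (boundary_pixel : String) (enhancement_table : List String) (out : String) : Prop := out = get_enhancement_encoding_alt image i j boundary_pixel enhancement_table
instance (image : List (List String)) (i : Int) (j : Int) (boundary_pixel : String) (enhancement_table : List String) (out : String) : Decidable (Spec_get_enhancement_encoding image i j boundary_pixel enhancement_table out) := by unfold Spec_get_enhancement_encoding; infer_instance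

-- ===== CLAIM (what is proved, stated in full; the proofs are below) =====
def Claim_equal_get_enhancement_encoding : Prop := ∀ (image : List (List String)) (i : Int) (j : Int) (boundary_pixel : String) (enhancement_table : List String), Dom_get_enhancement_encoding image i j boundary_pixel enhancement_table → Pre_get_enhancement_encoding image i j boundary_pixel enhancement_table → Spec_get_enhancement_encoding image i j boundary_pixel enhancement_table (get_enhancement_encoding image i j boundary_pixel enhancement_table)

-- ===== LEMMAS AND PROOFS =====

-- a foldl that only accumulates by addition is init + the sum of the mapped list
theorem pvFoldlAddSum (g : Int → Int) (l : List Int) (init : Int) :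
    l.foldl (fun a x => a + g x) init = init + (l.map g).sum := by
  induction l generalizing init with
  | nil => simp
  | cons x xs ih => simp [ih]; ring

-- pyRange evaluation for windows of width ≤ 3
theorem pvPr0 {a b : Int} (h : b ≤ a) : PySem.List.pyRange a b 1 = [] :=
  PySem.List.pyRange_one_eq_nil h
theorem pvPr1 {a b : Int} (h : b = a + 1) : PySem.List.pyRange a b 1 = [a] := by
  subst h; rw [PySem.List.pyRange_one_cons (by omega), pvPr0 (by omega)]
theorem pvPr2 {a b : Int} (h : b = a + 2) : PySem.List.pyRange a b 1 = [a, a + 1] := by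
  subst h; rw [PySem.List.pyRange_one_cons (by omega), pvPr1 (by omega)]
theorem pvPr3 {a b : Int} (h : b = a + 3) : PySem.List.pyRange a b 1 = [a, a + 1, a + 1 + 1] := by
  subst h; rw [PySem.List.pyRange_one_cons (by omega), pvPr2 (by omega)]

-- the sum of f over the clipped window [max(x-1,0), min(x+2,h)) equals the sum of the
-- three guarded terms at x-1, x, x+1
theorem pvSumClip (x h : Int) (hh : 0 ≤ h) (f : Int → Int) :
    ((PySem.List.pyRange (max (x-1) 0) (min (x+2) h) 1).map f).sum =
      (if 0 ≤ x - 1 ∧ x - 1 < h then f (x-1) else 0) +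
      ((if 0 ≤ x ∧ x < h then f x else 0) +
       (if 0 ≤ x + 1 ∧ x + 1 < h then f (x+1) else 0)) := by
  rcases (show 1 ≤ x ∨ x < 1 by omega) with p1 | px
  · -- x ≥ 1 : window starts at x-1
    rw [show max (x-1) 0 = x - 1 from by omega]
    rcases (show x + 2 ≤ h ∨ h < x + 2 by omega) with q1 | qh
    · rw [show min (x+2) h = x - 1 + 3 from by omega, pvPr3 rfl]
      rw [if_pos (by omega), if_pos (by omega), if_pos (by omega)]
      simp only [List.map_cons, List.map_nil, List.sum_cons, List.sum_nil,
        show x - 1 + 1 = x from by ring, add_zero]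
    · by_cases q2 : h = x + 1
      · rw [show min (x+2) h = x - 1 + 2 from by omega, pvPr2 rfl]
        rw [if_pos (by omega), if_pos (by omega), if_neg (by omega)]
        simp only [List.map_cons, List.map_nil, List.sum_cons, List.sum_nil,
          show x - 1 + 1 = x from by ring, add_zero]
      · by_cases q3 : h = x
        · rw [show min (x+2) h = x - 1 + 1 from by omega, pvPr1 rfl]
          rw [if_pos (by omega), if_neg (by omega), if_neg (by omega)]
          simp
        · rw [pvPr0 (by omega)]
          rw [if_neg (by omega), if_neg (by omega), if_neg (by omega)]
          simp
  · rw [show max (x-1) 0 = 0 from by omega]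
    by_cases p2 : x = 0
    · subst p2
      rcases (show 2 ≤ h ∨ h < 2 by omega) with q1 | qh
      · rw [show min (0+2) h = 0 + 2 from by omega, pvPr2 rfl]
        rw [if_neg (by omega), if_pos (by omega), if_pos (by omega)]
        simp
      · by_cases q2 : h = 1
        · rw [show min (0+2) h = 0 + 1 from by omega, pvPr1 rfl]
          rw [if_neg (by omega), if_pos (by omega), if_neg (by omega)]
          simp
        · rw [pvPr0 (by omega)]
          rw [if_neg (by omega), if_neg (by omega), if_neg (by omega)]
          simp
    · by_cases p3 : x = -1
      · subst p3
        rcases (show 1 ≤ h ∨ h < 1 by omega) with q1 | qh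
        · rw [show min (-1+2) h = 0 + 1 from by omega, pvPr1 rfl]
          rw [if_neg (by omega), if_neg (by omega), if_pos (by omega)]
          norm_num
        · rw [pvPr0 (by omega)]
          rw [if_neg (by omega), if_neg (by omega), if_neg (by omega)]
          simp
      · rw [pvPr0 (by omega)]
        rw [if_neg (by omega), if_neg (by omega), if_neg (by omega)]
        simp

-- A's reversed enumerate/shift/or encoder on 9 pixels is the weighted bit sum
theorem pvEncodeA (p1 p2 p3 p4 p5 p6 p7 p8 p9 : String) :
    get_encoding_number [p1, p2, p3, p4, p5, p6, p7, p8, p9] =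
      256 * (if p1 == "#" then (1:Int) else 0) + 128 * (if p2 == "#" then (1:Int) else 0) +
      64 * (if p3 == "#" then (1:Int) else 0) + 32 * (if p4 == "#" then (1:Int) else 0) +
      16 * (if p5 == "#" then (1:Int) else 0) + 8 * (if p6 == "#" then (1:Int) else 0) +
      4 * (if p7 == "#" then (1:Int) else 0) + 2 * (if p8 == "#" then (1:Int) else 0) +
      (if p9 == "#" then (1:Int) else 0) := by
  simp only [get_encoding_number, List.reverse, List.reverseAux,
    PySem.List.enumerate, List.foldl]
  generalize (p1 == "#") = b1
  generalize (p2 == "#") = b2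
  generalize (p3 == "#") = b3
  generalize (p4 == "#") = b4
  generalize (p5 == "#") = b5
  generalize (p6 == "#") = b6
  generalize (p7 == "#") = b7
  generalize (p8 == "#") = b8
  generalize (p9 == "#") = b9
  revert b1 b2 b3 b4 b5 b6 b7 b8 b9
  decide

theorem pvWidthEq (image : List (List String)) :
    (if image.isEmpty then (0 : Int) else ((image.headD []).length : Int)) =
    ((image.headD []).length : Int) := by
  cases image <;> simp

-- A's guarded-pixel bit as nested row/column guards (same atoms as pvSumClip's)
theorem pvBitCore (image : List (List String)) (bp : String) (k l : Int) (x : String) :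
    (if (if pvCore image k l then x else bp) == "#" then (1:Int) else 0) =
      if 0 ≤ k ∧ k < (image.length : Int) then
        (if 0 ≤ l ∧ l < ((image.headD []).length : Int) then (if x == "#" then (1:Int) else 0)
         else (if bp == "#" then (1:Int) else 0))
      else (if bp == "#" then (1:Int) else 0) := by
  simp only [pvCore, Bool.and_eq_true, decide_eq_true_eq]
  split_ifs <;> tauto

-- ===== VERDICT (by name: the statement is the Claim_ definition above) =====
theorem get_enhancement_encoding_spec : Claim_equal_get_enhancement_encoding := by
  intro image i j boundary_pixel enhancement_table _hDom _hPre
  unfold Spec_get_enhancement_encoding get_enhancement_encoding get_enhancement_encoding_alt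
  simp only [pvWidthEq, List.map_cons, List.map_nil]
  rw [pvEncodeA]
  congr 2
  simp only [pvFoldlAddSum]
  rw [pvSumClip i ((image.length : Int)) (by positivity)]
  simp only [pvSumClip j (((image.headD []).length : Int)) (by positivity)]
  simp only [pvBitCore]
  simp only [show (8 - 3 * (i - 1 - i + 1) - (j - 1 - j + 1) : Int) = 8 from by ring,
    show (8 - 3 * (i - 1 - i + 1) - (j - j + 1) : Int) = 7 from by ring,
    show (8 - 3 * (i - 1 - i + 1) - (j + 1 - j + 1) : Int) = 6 from by ring,
    show (8 - 3 * (i - i + 1) - (j - 1 - j + 1) : Int) = 5 from by ring,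
    show (8 - 3 * (i - i + 1) - (j - j + 1) : Int) = 4 from by ring,
    show (8 - 3 * (i - i + 1) - (j + 1 - j + 1) : Int) = 3 from by ring,
    show (8 - 3 * (i + 1 - i + 1) - (j - 1 - j + 1) : Int) = 2 from by ring,
    show (8 - 3 * (i + 1 - i + 1) - (j - j + 1) : Int) = 1 from by ring,
    show (8 - 3 * (i + 1 - i + 1) - (j + 1 - j + 1) : Int) = 0 from by ring,
    show ((8 : Int)).toNat = 8 from rfl, show ((7 : Int)).toNat = 7 from rfl,
    show ((6 : Int)).toNat = 6 from rfl, show ((5 : Int)).toNat = 5 from rfl,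
    show ((4 : Int)).toNat = 4 from rfl, show ((3 : Int)).toNat = 3 from rfl,
    show ((2 : Int)).toNat = 2 from rfl, show ((1 : Int)).toNat = 1 from rfl,
    show ((0 : Int)).toNat = 0 from rfl]
  generalize (if boundary_pixel == "#" then (1:Int) else 0) = bb
  generalize (if ((PySem.List.pyGet? ((PySem.List.pyGet? image (i-1)).getD []) (j-1)).getD "" == "#") then (1:Int) else 0) = c1
  generalize (if ((PySem.List.pyGet? ((PySem.List.pyGet? image (i-1)).getD []) j).getD "" == "#") then (1:Int) else 0) = c2
  generalize (if ((PySem.List.pyGet? ((PySem.List.pyGet? image (i-1)).getD []) (j+1)).getD "" == "#") then (1:Int) else 0) = c3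
  generalize (if ((PySem.List.pyGet? ((PySem.List.pyGet? image i).getD []) (j-1)).getD "" == "#") then (1:Int) else 0) = c4
  generalize (if ((PySem.List.pyGet? ((PySem.List.pyGet? image i).getD []) j).getD "" == "#") then (1:Int) else 0) = c5
  generalize (if ((PySem.List.pyGet? ((PySem.List.pyGet? image i).getD []) (j+1)).getD "" == "#") then (1:Int) else 0) = c6
  generalize (if ((PySem.List.pyGet? ((PySem.List.pyGet? image (i+1)).getD []) (j-1)).getD "" == "#") then (1:Int) else 0) = c7
  generalize (if ((PySem.List.pyGet? ((PySem.List.pyGet? image (i+1)).getD []) j).getD "" == "#") then (1:Int) else 0) = c8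
  generalize (if ((PySem.List.pyGet? ((PySem.List.pyGet? image (i+1)).getD []) (j+1)).getD "" == "#") then (1:Int) else 0) = c9
  split_ifs <;> ring
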